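-- pv_equiv track=rewrite | github.com/fcs7/translate-php-webtool | backend/translate.py | detect_language_from_path
-- ===== SOURCE A (Python) =====
-- def detect_language_from_path(path):
--     """Tenta detectar o idioma baseado no nome do diretório."""
--     path_lower = path.lower()
--
--     lang_patterns = {
--         'en': ['en', 'english', 'en_us', 'en-us', 'eng'],
--         'pt-br': ['br', 'pt-br', 'pt_br', 'portuguese', 'brasil', 'brazil'],
--         'es': ['es', 'spanish', 'español', 'espanol'],
--         'fr': ['fr', 'french', 'français', 'francais'],
--         'de': ['de', 'german', 'deutsch'],
--         'it': ['it', 'italian', 'italiano'],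
--     }
--
--     for lang, patterns in lang_patterns.items():
--         for pattern in patterns:
--             if f'/{pattern}/' in path_lower or path_lower.endswith(f'/{pattern}'):
--                 return lang
--
--     return 'unknown'
-- ===== SOURCE B (Python) =====
-- _REV = {
--     'en': 'en', 'english': 'en', 'en_us': 'en', 'en-us': 'en', 'eng': 'en',
--     'br': 'pt-br', 'pt-br': 'pt-br', 'pt_br': 'pt-br', 'portuguese': 'pt-br',
--     'brasil': 'pt-br', 'brazil': 'pt-br',
--     'es': 'es', 'spanish': 'es', 'español': 'es', 'espanol': 'es',
--     'fr': 'fr', 'french': 'fr', 'français': 'fr', 'francais': 'fr',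
--     'de': 'de', 'german': 'de', 'deutsch': 'de',
--     'it': 'it', 'italian': 'it', 'italiano': 'it',
-- }
-- _LANGS = ['en', 'pt-br', 'es', 'fr', 'de', 'it']
--
--
-- def detect_language_from_path(path):
--     """Tenta detectar o idioma baseado no nome do diretório."""
--     # only slash-preceded segments count, hence [1:]
--     segments = path.lower().split('/')[1:]
--     matched = {_REV[seg] for seg in segments if seg in _REV}
--     return next((lang for lang in _LANGS if lang in matched), 'unknown')
-- ===== Notes on version B (the rewrite author's own statement) =====
-- stated objective: faster
-- what changed: A rescans the whole path twice per pattern (52 substring searches); B splits the lowered path once into slash-separated segments and looks each slash-preceded segment up in a precomputed pattern-to-language dict, then returns the first language of the priority list found.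
import Mathlib
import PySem

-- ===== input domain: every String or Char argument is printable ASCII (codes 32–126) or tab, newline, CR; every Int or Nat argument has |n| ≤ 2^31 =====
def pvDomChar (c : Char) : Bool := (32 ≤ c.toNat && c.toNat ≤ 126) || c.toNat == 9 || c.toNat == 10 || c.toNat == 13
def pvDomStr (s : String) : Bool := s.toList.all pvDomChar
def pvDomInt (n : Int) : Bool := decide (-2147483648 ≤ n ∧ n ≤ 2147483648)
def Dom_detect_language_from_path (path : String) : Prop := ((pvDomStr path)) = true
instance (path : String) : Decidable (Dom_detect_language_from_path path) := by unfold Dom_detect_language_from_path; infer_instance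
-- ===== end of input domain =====

-- B replaces A's 52 substring scans of the path (2 per pattern) by one split of the path into
-- slash-separated segments and a reverse-dictionary lookup per segment; equal return value on every input.

-- ===== PORT A =====
def aTable : List (String × List String) :=
  [("en", ["en", "english", "en_us", "en-us", "eng"]),
   ("pt-br", ["br", "pt-br", "pt_br", "portuguese", "brasil", "brazil"]),
   ("es", ["es", "spanish", "español", "espanol"]),
   ("fr", ["fr", "french", "français", "francais"]),
   ("de", ["de", "german", "deutsch"]),
   ("it", ["it", "italian", "italiano"])]

-- A's inner condition: f'/{pattern}/' in path_lower or path_lower.endswith(f'/{pattern}')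
def aMatch (pl p : String) : Bool :=
  PySem.Str.isIn ("/" ++ p ++ "/") pl || PySem.Str.endswith pl ("/" ++ p)

-- A's inner `for pattern in patterns` loop with its early return
def aInner (pl : String) : List String → Bool
  | [] => false
  | p :: rest => if aMatch pl p then true else aInner pl rest

-- A's outer `for lang, patterns in lang_patterns.items()` loop
def aOuter (pl : String) : List (String × List String) → String
  | [] => "unknown"
  | (lang, pats) :: rest => if aInner pl pats then lang else aOuter pl rest

def detect_language_from_path (path : String) : String :=
  aOuter (PySem.Str.lower path) aTable

-- ===== PORT B =====
def bRev : PySem.Dict String String := PySem.Dict.mk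
  [("en", "en"), ("english", "en"), ("en_us", "en"), ("en-us", "en"), ("eng", "en"),
   ("br", "pt-br"), ("pt-br", "pt-br"), ("pt_br", "pt-br"), ("portuguese", "pt-br"),
   ("brasil", "pt-br"), ("brazil", "pt-br"),
   ("es", "es"), ("spanish", "es"), ("español", "es"), ("espanol", "es"),
   ("fr", "fr"), ("french", "fr"), ("français", "fr"), ("francais", "fr"),
   ("de", "de"), ("german", "de"), ("deutsch", "de"),
   ("it", "it"), ("italian", "it"), ("italiano", "it")]

def bLangs : List String := ["en", "pt-br", "es", "fr", "de", "it"]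

def detect_language_from_path_alt (path : String) : String :=
  -- path.lower().split('/')[1:]  (split on the non-empty separator "/")
  let segments := ((PySem.Chars.splitOn (PySem.Str.lower path).toList ['/']).map String.ofList).drop 1
  -- {_REV[seg] for seg in segments if seg in _REV}
  let matched : PySem.Set String := PySem.Set.ofList (segments.filterMap (fun seg => bRev.get? seg))
  -- next((lang for lang in _LANGS if lang in matched), 'unknown')
  match bLangs.find? (fun lang => PySem.Set.contains matched lang) with
  | some lang => lang
  | none => "unknown"

-- ===== PRECONDITION & SPEC =====
def Spec_detect_language_from_path (path : String) (out : String) : Prop := out = detect_language_from_path_alt path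
instance (path : String) (out : String) : Decidable (Spec_detect_language_from_path path out) := by unfold Spec_detect_language_from_path; infer_instance

-- ===== CLAIM (what is proved, stated in full; the proofs are below) =====
def Claim_equal_detect_language_from_path : Prop := ∀ (path : String), Dom_detect_language_from_path path → Spec_detect_language_from_path path (detect_language_from_path path)

-- ===== LEMMAS AND PROOFS =====

-- PySem's fuel-based splitOn with the one-char separator '/' computes Mathlib's List.splitOn
theorem pv_go_spec (fuel : Nat) (l cur : List Char) (acc : List (List Char)) (hf : l.length < fuel) :
    PySem.Chars.splitOn.go ['/'] fuel l cur acc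
      = acc.reverse ++ (l.splitOn '/').modifyHead (fun x => cur.reverse ++ x) := by
  induction fuel generalizing l cur acc with
  | zero => omega
  | succ n ih =>
    cases l with
    | nil =>
      rw [PySem.Chars.splitOn.go]
      · simp [List.splitOn]
      · omega
    | cons c rest =>
      rw [PySem.Chars.splitOn.go]
      by_cases hc : c = '/'
      · subst hc
        simp only [List.isPrefixOf, Bool.and_true, beq_self_eq_true, if_true, List.length_cons,
          List.length_nil, List.drop_succ_cons, List.drop_zero]
        rw [ih rest [] (cur.reverse :: acc) (by simpa using hf)]
        simp [List.splitOn, List.splitOnP_cons]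
        cases List.splitOnP (fun x => x == '/') rest <;> simp
      · have hpre : List.isPrefixOf ['/'] (c :: rest) = false := by
          simp [List.isPrefixOf]
          exact fun h => absurd h.symm hc
        simp only [hpre, Bool.false_eq_true, if_false]
        rw [ih rest (c :: cur) acc (by simpa using hf)]
        have h1 : List.splitOn '/' (c :: rest) = (List.splitOn '/' rest).modifyHead (List.cons c) := by
          simp [List.splitOn, List.splitOnP_cons, hc]
        rw [h1]
        obtain ⟨h, r, he⟩ : ∃ h r, List.splitOn '/' rest = h :: r := by
          cases hs : List.splitOn '/' rest with
          | nil => exact absurd hs (List.splitOnP_ne_nil _ _)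
          | cons h r => exact ⟨h, r, rfl⟩
        rw [he]
        simp

theorem pv_splitOn_eq (s : List Char) :
    PySem.Chars.splitOn s ['/'] = s.splitOn '/' := by
  unfold PySem.Chars.splitOn
  rw [pv_go_spec (s.length + 1) s [] [] (by omega)]
  cases hs : List.splitOn '/' s with
  | nil => exact absurd hs (List.splitOnP_ne_nil _ _)
  | cons h r => simp

theorem pv_splitOn_append (a t : List Char) :
    (a ++ '/' :: t).splitOn '/' = a.splitOn '/' ++ t.splitOn '/' := by
  induction a with
  | nil => simp [List.splitOn, List.splitOnP_cons]
  | cons c a' ih =>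
    by_cases hc : c = '/'
    · subst hc
      simp [List.splitOn, List.splitOnP_cons] at ih ⊢
      exact ih
    · simp only [List.cons_append, List.splitOn, List.splitOnP_cons, beq_iff_eq, hc, if_false] at ih ⊢
      rw [ih]
      exact (by
        cases hs : List.splitOnP (fun x => x == '/') a' with
        | nil => exact absurd hs (List.splitOnP_ne_nil _ _)
        | cons h r => simp)

theorem pv_splitOn_single (p : List Char) (h : '/' ∉ p) : p.splitOn '/' = [p] := by
  induction p with
  | nil => simp [List.splitOn]
  | cons c p' ih =>
    have hc : c ≠ '/' := fun he => h (he ▸ List.mem_cons_self ..)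
    have : p'.splitOn '/' = [p'] := ih (fun hm => h (List.mem_cons_of_mem _ hm))
    simp only [List.splitOn, List.splitOnP_cons, beq_iff_eq, hc, if_false] at this ⊢
    rw [this]
    rfl

theorem pv_splitOn_head_decomp (t : List Char) (h : List Char) (rest : List (List Char))
    (he : t.splitOn '/' = h :: rest) : t = h ∨ ∃ r, t = h ++ '/' :: r := by
  induction t generalizing h rest with
  | nil =>
    simp [List.splitOn] at he
    exact Or.inl he.1.symm
  | cons c t' ih =>
    by_cases hc : c = '/'
    · subst hc
      simp [List.splitOn, List.splitOnP_cons] at he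
      exact Or.inr ⟨t', by rw [he.1]; rfl⟩
    · simp only [List.splitOn, List.splitOnP_cons, beq_iff_eq, hc, if_false] at he
      obtain ⟨h', r', he'⟩ : ∃ h' r', List.splitOnP (fun x => x == '/') t' = h' :: r' := by
        cases hs : List.splitOnP (fun x => x == '/') t' with
        | nil => exact absurd hs (List.splitOnP_ne_nil _ _)
        | cons a b => exact ⟨a, b, rfl⟩
      rw [he'] at he
      simp at he
      obtain ⟨hh, hr⟩ := he
      rcases ih h' r' (by simp [List.splitOn, he']) with h1 | ⟨r, h2⟩
      · exact Or.inl (by rw [← hh, ← h1])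
      · exact Or.inr ⟨r, by rw [← hh]; simp [h2]⟩

-- p is a slash-preceded segment of s  ↔  '/p/' occurs in s or s ends with '/p'
theorem pv_seg_iff (p s : List Char) (hp : '/' ∉ p) :
    p ∈ (s.splitOn '/').drop 1 ↔ ('/' :: (p ++ ['/'])) <:+: s ∨ ('/' :: p) <:+ s := by
  constructor
  · intro hm
    induction s with
    | nil => simp [List.splitOn] at hm
    | cons c t ih =>
      by_cases hc : c = '/'
      · subst hc
        have h1 : List.splitOn '/' ('/' :: t) = [] :: t.splitOn '/' := by
          simp [List.splitOn, List.splitOnP_cons]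
        rw [h1] at hm
        simp only [List.drop_succ_cons, List.drop_zero] at hm
        obtain ⟨h, r, he⟩ : ∃ h r, List.splitOn '/' t = h :: r := by
          cases hs : List.splitOn '/' t with
          | nil => exact absurd hs (List.splitOnP_ne_nil _ _)
          | cons a b => exact ⟨a, b, rfl⟩
        rw [he] at hm
        rcases List.mem_cons.mp hm with rfl | hm'
        · rcases pv_splitOn_head_decomp t p r he with rfl | ⟨r', rfl⟩
          · exact Or.inr ⟨[], rfl⟩
          · exact Or.inl ⟨[], r', by simp⟩
        · rcases ih (by rw [he]; simpa using hm') with hin | hsuf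
          · exact Or.inl (hin.trans (List.suffix_cons '/' t).isInfix)
          · exact Or.inr (hsuf.trans (List.suffix_cons '/' t))
      · have h1 : List.splitOn '/' (c :: t) = (List.splitOn '/' t).modifyHead (List.cons c) := by
          simp [List.splitOn, List.splitOnP_cons, hc]
        rw [h1] at hm
        obtain ⟨h, r, he⟩ : ∃ h r, List.splitOn '/' t = h :: r := by
          cases hs : List.splitOn '/' t with
          | nil => exact absurd hs (List.splitOnP_ne_nil _ _)
          | cons a b => exact ⟨a, b, rfl⟩
        rw [he] at hm
        simp only [List.modifyHead, List.drop_succ_cons, List.drop_zero] at hm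
        have hm' : p ∈ (List.splitOn '/' t).drop 1 := by rw [he]; simpa using hm
        rcases ih hm' with hin | hsuf
        · exact Or.inl (hin.trans (List.suffix_cons c t).isInfix)
        · exact Or.inr (hsuf.trans (List.suffix_cons c t))
  · intro hm
    rcases hm with ⟨a, b, rfl⟩ | ⟨a, rfl⟩
    · have : a ++ '/' :: (p ++ ['/']) ++ b = a ++ '/' :: (p ++ '/' :: b) := by simp
      rw [this, pv_splitOn_append a (p ++ '/' :: b), pv_splitOn_append p b, pv_splitOn_single p hp]
      obtain ⟨h, r, he⟩ : ∃ h r, List.splitOn '/' a = h :: r := by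
        cases hs : List.splitOn '/' a with
        | nil => exact absurd hs (List.splitOnP_ne_nil _ _)
        | cons x y => exact ⟨x, y, rfl⟩
      rw [he]
      simp
    · rw [pv_splitOn_append a p, pv_splitOn_single p hp]
      obtain ⟨h, r, he⟩ : ∃ h r, List.splitOn '/' a = h :: r := by
        cases hs : List.splitOn '/' a with
        | nil => exact absurd hs (List.splitOnP_ne_nil _ _)
        | cons x y => exact ⟨x, y, rfl⟩
      rw [he]
      simp

-- A's match test, characterised by segment membership
theorem pv_aMatch_iff (pl p : String) (hp : '/' ∉ p.toList) :
    aMatch pl p = true ↔ p.toList ∈ (pl.toList.splitOn '/').drop 1 := by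
  rw [pv_seg_iff p.toList pl.toList hp]
  simp only [aMatch, Bool.or_eq_true, PySem.Str.isIn_iff_infix, PySem.Str.endswith_eq,
    PySem.Chars.endswith_iff, String.toList_append]
  constructor
  · rintro (h | h)
    · left; simpa using h
    · right; simpa using h
  · rintro (h | h)
    · left; simpa using h
    · right; simpa using h

theorem pv_get?_mk_eq_some_iff {l : List (String × String)} (hnd : (l.map Prod.fst).Nodup) (k v : String) :
    (PySem.Dict.mk l).get? k = some v ↔ (k, v) ∈ l := by
  induction l with
  | nil => simp [PySem.Dict.get?]
  | cons p rest ih =>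
    obtain ⟨pk, pv⟩ := p
    simp only [List.map_cons, List.nodup_cons] at hnd
    by_cases hk : pk = k
    · subst hk
      simp only [PySem.Dict.get?, List.find?_cons, beq_self_eq_true]
      have hnd1 : pk ∉ rest.map Prod.fst := by simpa using hnd.1
      have hnotin : ∀ v', (pk, v') ∉ rest := fun v' hm =>
        hnd1 (List.mem_map_of_mem (f := Prod.fst) hm)
      simp only [Option.map_some, Option.some.injEq, List.mem_cons, Prod.mk.injEq,
        true_and]
      constructor
      · intro h; exact Or.inl h.symm
      · rintro (rfl | hm)
        · rfl
        · exact absurd hm (hnotin v)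
    · have : ((pk, pv).1 == k) = false := by simpa using hk
      simp only [PySem.Dict.get?, List.find?_cons, this]
      rw [show (Option.map (fun x => x.2) (List.find? (fun p => p.1 == k) rest)) = (PySem.Dict.mk rest).get? k from rfl]
      rw [ih hnd.2]
      simp [Prod.ext_iff, Ne.symm hk]

-- each language's reverse-lookup group
theorem pv_rev_en (seg : String) :
    bRev.get? seg = some "en" ↔ seg ∈ (["en", "english", "en_us", "en-us", "eng"] : List String) := by
  rw [show bRev.get? seg = (PySem.Dict.mk bRev.items).get? seg from rfl,
      pv_get?_mk_eq_some_iff (by decide) seg "en"]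
  simp [bRev, Prod.ext_iff]

theorem pv_rev_ptbr (seg : String) :
    bRev.get? seg = some "pt-br" ↔ seg ∈ (["br", "pt-br", "pt_br", "portuguese", "brasil", "brazil"] : List String) := by
  rw [show bRev.get? seg = (PySem.Dict.mk bRev.items).get? seg from rfl,
      pv_get?_mk_eq_some_iff (by decide) seg "pt-br"]
  simp [bRev, Prod.ext_iff]

theorem pv_rev_es (seg : String) :
    bRev.get? seg = some "es" ↔ seg ∈ (["es", "spanish", "español", "espanol"] : List String) := by
  rw [show bRev.get? seg = (PySem.Dict.mk bRev.items).get? seg from rfl,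
      pv_get?_mk_eq_some_iff (by decide) seg "es"]
  simp [bRev, Prod.ext_iff]

theorem pv_rev_fr (seg : String) :
    bRev.get? seg = some "fr" ↔ seg ∈ (["fr", "french", "français", "francais"] : List String) := by
  rw [show bRev.get? seg = (PySem.Dict.mk bRev.items).get? seg from rfl,
      pv_get?_mk_eq_some_iff (by decide) seg "fr"]
  simp [bRev, Prod.ext_iff]

theorem pv_rev_de (seg : String) :
    bRev.get? seg = some "de" ↔ seg ∈ (["de", "german", "deutsch"] : List String) := by
  rw [show bRev.get? seg = (PySem.Dict.mk bRev.items).get? seg from rfl,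
      pv_get?_mk_eq_some_iff (by decide) seg "de"]
  simp [bRev, Prod.ext_iff]

theorem pv_rev_it (seg : String) :
    bRev.get? seg = some "it" ↔ seg ∈ (["it", "italian", "italiano"] : List String) := by
  rw [show bRev.get? seg = (PySem.Dict.mk bRev.items).get? seg from rfl,
      pv_get?_mk_eq_some_iff (by decide) seg "it"]
  simp [bRev, Prod.ext_iff]

-- A's inner loop, characterised by segment membership
theorem pv_aInner_iff (plS : String) (pats : List String)
    (hslash : ∀ p ∈ pats, '/' ∉ p.toList) :
    aInner plS pats = true ↔ ∃ p ∈ pats, p.toList ∈ (plS.toList.splitOn '/').drop 1 := by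
  induction pats with
  | nil => simp [aInner]
  | cons p rest ih =>
    have hp := hslash p (List.mem_cons_self ..)
    simp only [aInner]
    by_cases hm : aMatch plS p = true
    · simp only [hm, if_true, true_iff]
      exact ⟨p, List.mem_cons_self .., (pv_aMatch_iff plS p hp).mp hm⟩
    · have hm' : aMatch plS p = false := by simpa using hm
      simp only [hm', Bool.false_eq_true, if_false]
      rw [ih (fun q hq => hslash q (List.mem_cons_of_mem _ hq))]
      constructor
      · rintro ⟨q, hq, hqs⟩; exact ⟨q, List.mem_cons_of_mem _ hq, hqs⟩
      · rintro ⟨q, hq, hqs⟩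
        rcases List.mem_cons.mp hq with rfl | hq'
        · exact absurd ((pv_aMatch_iff plS q hp).mpr hqs) hm
        · exact ⟨q, hq', hqs⟩

-- one language column: A's inner loop agrees with B's membership test in `matched`
theorem pv_lang_eq (plS : String) (lang : String) (pats : List String)
    (hslash : ∀ p ∈ pats, '/' ∉ p.toList)
    (hrev : ∀ seg : String, bRev.get? seg = some lang ↔ seg ∈ pats) :
    aInner plS pats =
      PySem.Set.contains
        (PySem.Set.ofList
          ((((PySem.Chars.splitOn plS.toList ['/']).map String.ofList).drop 1).filterMap
            (fun seg => bRev.get? seg))) lang := by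
  rw [Bool.eq_iff_iff]
  rw [pv_aInner_iff plS pats hslash, PySem.Set.contains_iff, PySem.Set.mem_ofList, pv_splitOn_eq]
  rw [← List.map_drop]
  simp only [List.mem_filterMap, List.mem_map]
  constructor
  · rintro ⟨p, hp, hps⟩
    exact ⟨String.ofList p.toList, ⟨p.toList, hps, rfl⟩, (hrev _).mpr (by simpa using hp)⟩
  · rintro ⟨seg, ⟨l, hl, rfl⟩, hget⟩
    have hsegmem := (hrev _).mp hget
    refine ⟨String.ofList l, hsegmem, ?_⟩
    simpa using hl

theorem detect_eq (path : String) :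
    detect_language_from_path path = detect_language_from_path_alt path := by
  unfold detect_language_from_path detect_language_from_path_alt
  simp only [aTable, aOuter]
  rw [pv_lang_eq _ "en" _ (by decide) pv_rev_en,
      pv_lang_eq _ "pt-br" _ (by decide) pv_rev_ptbr,
      pv_lang_eq _ "es" _ (by decide) pv_rev_es,
      pv_lang_eq _ "fr" _ (by decide) pv_rev_fr,
      pv_lang_eq _ "de" _ (by decide) pv_rev_de,
      pv_lang_eq _ "it" _ (by decide) pv_rev_it]
  simp only [bLangs, List.find?]
  cases PySem.Set.contains _ "en" <;> cases PySem.Set.contains _ "pt-br" <;>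
    cases PySem.Set.contains _ "es" <;> cases PySem.Set.contains _ "fr" <;>
    cases PySem.Set.contains _ "de" <;> cases PySem.Set.contains _ "it" <;> simp

-- ===== VERDICT (by name: the statement is the Claim_ definition above) =====
theorem detect_language_from_path_spec : Claim_equal_detect_language_from_path := by
  intro path _
  unfold Spec_detect_language_from_path
  exact detect_eq path
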